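-- pv_equiv track=rewrite | github.com/HwiNyeonKim/algorithm-2025 | programmers/연습문제/최적의_행렬_곱셈.py | solution
-- ===== SOURCE A (Python) =====
-- def solution(matrix_sizes):
--     sizes = [
--         matrix_size[0] for matrix_size in matrix_sizes[1:]
--     ]
--     first = matrix_sizes[0][0]
--     last = matrix_sizes[-1][1]
--     # [[5, 3], [3, 10], [10, 6]] -> [5, 3, 10, 6]으로 serialize
--     # 그런데, 첫 값과 마지막 값은 결국 최종 계산에 반드시 들어가야 하므로 따로 빼둔다.
--     # 즉, 반복문 내에서 계산에 이용되는 serialized values는 [3, 10]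
--
--     # sizes에서 최댓값을 찾아, 그 최댓값을 가지는 행렬끼리 먼저 곱한다.
--
--     count = 0
--     while sizes:
--         index = sizes.index(max(sizes))
--
--         row = first if index == 0 else sizes[index - 1]
--         middle = sizes[index]
--         column = last if index == len(sizes) - 1 else sizes[index + 1]
--         count += row * middle * column
--
--         sizes.pop(index)
--
--     return count
-- ===== SOURCE B (Python) =====
-- def solution(matrix_sizes):
--     first = matrix_sizes[0][0]
--     last = matrix_sizes[-1][1]
--     vals = [m[0] for m in matrix_sizes[1:]]
--     count = 0
--     stack = []  # values kept strictly increasing bottom-to-top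
--     for v in vals:
--         while stack and v <= stack[-1]:
--             mid = stack.pop()
--             left = stack[-1] if stack else first
--             count += left * mid * v
--         stack.append(v)
--     while stack:
--         mid = stack.pop()
--         left = stack[-1] if stack else first
--         count += left * mid * last
--     return count
-- ===== Notes on version B (the rewrite author's own statement) =====
-- stated objective: alternative
-- what changed: replaced the repeated scan-for-max-and-pop loop (find max, multiply with its two neighbours, remove it) by a single left-to-right monotonic-stack pass that charges each value against its nearest strictly-smaller left neighbour and nearest smaller-or-equal right neighbour
import Mathlib
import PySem

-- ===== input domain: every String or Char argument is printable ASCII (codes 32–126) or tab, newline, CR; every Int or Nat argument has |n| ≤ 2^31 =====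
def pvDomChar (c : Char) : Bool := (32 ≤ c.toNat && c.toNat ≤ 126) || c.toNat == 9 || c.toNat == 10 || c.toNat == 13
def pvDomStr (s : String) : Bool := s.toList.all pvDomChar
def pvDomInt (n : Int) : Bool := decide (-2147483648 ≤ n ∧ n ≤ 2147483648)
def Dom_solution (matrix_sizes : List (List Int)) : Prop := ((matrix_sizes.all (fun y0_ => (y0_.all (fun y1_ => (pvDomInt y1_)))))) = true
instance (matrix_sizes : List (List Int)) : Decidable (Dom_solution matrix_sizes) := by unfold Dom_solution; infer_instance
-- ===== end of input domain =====

-- B replaces A's repeated scan-for-max-and-pop loop by a single monotonic-stack pass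
-- (a different algorithm with the same results; Python A mutates only its local `sizes` list, not the argument).

-- ===== PORT A =====
-- while sizes: find first max, cost += row*middle*column, pop it.
-- fuel = sizes.length makes the recursion structural; each iteration pops one element, so fuel never runs out.
def solLoop (first last : Int) : Nat → List Int → Int
  | _, [] => 0
  | 0, _ => 0
  | fuel+1, a :: t =>
    let sizes := a :: t
    match PySem.List.max? sizes (fun x => x) with
    | none => 0
    | some m =>
      match PySem.List.index? sizes m with
      | none => 0
      | some index =>
        match PySem.List.pop? sizes (index : Int) with
        | none => 0
        | some pr =>
          let row := if index = 0 then first else PySem.List.pyGetD sizes ((index : Int) - 1) 0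
          let middle := PySem.List.pyGetD sizes (index : Int) 0
          let column := if index = sizes.length - 1 then last else PySem.List.pyGetD sizes ((index : Int) + 1) 0
          row * middle * column + solLoop first last fuel pr.2

def solution (matrix_sizes : List (List Int)) : Int :=
  let sizes := (PySem.List.slice matrix_sizes (some 1) none).map (fun m => PySem.List.pyGetD m (0 : Int) 0)
  let first := PySem.List.pyGetD (PySem.List.pyGetD matrix_sizes (0 : Int) []) (0 : Int) 0
  let last := PySem.List.pyGetD (PySem.List.pyGetD matrix_sizes (-1 : Int) []) (1 : Int) 0
  solLoop first last sizes.length sizes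

-- ===== PORT B =====
-- stack is kept head = top (python appends/pops at the end); the inner `while` loop:
def altPop (first v : Int) : List Int → Int → List Int × Int
  | [], count => ([], count)
  | t :: rest, count =>
    if v ≤ t then altPop first v rest (count + (rest.headD first) * t * v)
    else (t :: rest, count)

def altStep (first : Int) (p : List Int × Int) (v : Int) : List Int × Int :=
  let q := altPop first v p.1 p.2
  (v :: q.1, q.2)

-- the final `while stack:` drain loop
def altDrain (first last : Int) : List Int → Int → Int
  | [], count => count
  | t :: rest, count => altDrain first last rest (count + (rest.headD first) * t * last)

def solution_alt (matrix_sizes : List (List Int)) : Int :=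
  let first := PySem.List.pyGetD (PySem.List.pyGetD matrix_sizes (0 : Int) []) (0 : Int) 0
  let last := PySem.List.pyGetD (PySem.List.pyGetD matrix_sizes (-1 : Int) []) (1 : Int) 0
  let vals := (PySem.List.slice matrix_sizes (some 1) none).map (fun m => PySem.List.pyGetD m (0 : Int) 0)
  let p := vals.foldl (altStep first) ([], 0)
  altDrain first last p.1 p.2

-- ===== PRECONDITION & SPEC =====
-- Pre_ excludes exactly the inputs on which Python A raises an IndexError:
-- the empty list, a member row with no entries, or a final row with fewer than two entries.
def Pre_solution (matrix_sizes : List (List Int)) : Prop :=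
  matrix_sizes ≠ [] ∧ (∀ m ∈ matrix_sizes, m ≠ []) ∧ 1 < (matrix_sizes.getLastD []).length

instance (matrix_sizes : List (List Int)) : Decidable (Pre_solution matrix_sizes) := by
  unfold Pre_solution; infer_instance

def pvWitness_solution : List (List Int) := [[5, 3], [3, 10], [10, 6]]

def Spec_solution (matrix_sizes : List (List Int)) (out : Int) : Prop := out = solution_alt matrix_sizes
instance (matrix_sizes : List (List Int)) (out : Int) : Decidable (Spec_solution matrix_sizes out) := by unfold Spec_solution; infer_instance

-- ===== CLAIM (what is proved, stated in full; the proofs are below) =====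
def Claim_equal_solution : Prop := ∀ (matrix_sizes : List (List Int)), Dom_solution matrix_sizes → Pre_solution matrix_sizes → Spec_solution matrix_sizes (solution matrix_sizes)

-- ===== LEMMAS AND PROOFS =====

-- B's total cost of a serialized chain, as solution_alt computes it
def costB (f l : Int) (s : List Int) : Int :=
  let p := s.foldl (altStep f) ([], 0)
  altDrain f l p.1 p.2

theorem altPop_shift (f v : Int) : ∀ (st : List Int) (c δ : Int),
    altPop f v st (c + δ) = ((altPop f v st c).1, (altPop f v st c).2 + δ) := by
  intro st
  induction st with
  | nil => intro c δ; simp [altPop]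
  | cons t rest ih =>
    intro c δ
    simp only [altPop]
    split
    · rw [show c + δ + rest.headD f * t * v = (c + rest.headD f * t * v) + δ by ring, ih]
    · rfl

theorem foldl_shift (f : Int) : ∀ (s : List Int) (p : List Int × Int) (δ : Int),
    s.foldl (altStep f) (p.1, p.2 + δ) =
      ((s.foldl (altStep f) p).1, (s.foldl (altStep f) p).2 + δ) := by
  intro s
  induction s with
  | nil => intro p δ; simp
  | cons a t ih =>
    intro p δ
    simp only [List.foldl_cons]
    have hstep : altStep f (p.1, p.2 + δ) a = ((altStep f p a).1, (altStep f p a).2 + δ) := by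
      simp only [altStep, altPop_shift]
    rw [hstep, ih]

theorem altDrain_shift (f l : Int) : ∀ (st : List Int) (c δ : Int),
    altDrain f l st (c + δ) = altDrain f l st c + δ := by
  intro st
  induction st with
  | nil => intro c δ; simp [altDrain]
  | cons t rest ih =>
    intro c δ
    simp only [altDrain]
    rw [show c + δ + rest.headD f * t * l = (c + rest.headD f * t * l) + δ by ring, ih]

theorem altPop_of_lt (f v : Int) (st : List Int) (c : Int) (h : ∀ y ∈ st, y < v) :
    altPop f v st c = (st, c) := by
  cases st with
  | nil => rfl
  | cons t rest =>
    have : ¬ v ≤ t := by have := h t (by simp); omega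
    simp [altPop, this]

theorem altPop_mem (f v : Int) : ∀ (st : List Int) (c : Int) (y : Int),
    y ∈ (altPop f v st c).1 → y ∈ st := by
  intro st
  induction st with
  | nil => intro c y h; simp [altPop] at h
  | cons t rest ih =>
    intro c y h
    simp only [altPop] at h
    split at h
    · exact List.mem_cons_of_mem _ (ih _ _ h)
    · exact h

theorem stack_mem (f : Int) : ∀ (s : List Int) (p : List Int × Int) (y : Int),
    y ∈ (s.foldl (altStep f) p).1 → y ∈ s ∨ y ∈ p.1 := by
  intro s
  induction s with
  | nil => intro p y h; exact Or.inr h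
  | cons a t ih =>
    intro p y h
    simp only [List.foldl_cons] at h
    rcases ih _ _ h with h' | h'
    · exact Or.inl (List.mem_cons_of_mem _ h')
    · simp only [altStep] at h'
      rcases List.mem_cons.mp h' with rfl | h''
      · exact Or.inl (List.mem_cons_self ..)
      · exact Or.inr (altPop_mem f a _ _ _ h'')

theorem stack_last (f : Int) : ∀ (s : List Int) (p : List Int × Int),
    ((s.foldl (altStep f) p).1).headD f = s.getLastD (p.1.headD f) := by
  intro s
  induction s with
  | nil => intro p; simp
  | cons a t ih =>
    intro p
    simp only [List.foldl_cons]
    rw [ih, List.getLastD_cons]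
    rfl

theorem costB_step (f l m : Int) (u w : List Int)
    (hu : ∀ x ∈ u, x < m) (hw : ∀ x ∈ w, x ≤ m) :
    costB f l (u ++ m :: w) = (u.getLastD f) * m * (w.headD l) + costB f l (u ++ w) := by
  unfold costB
  simp only [List.foldl_append, List.foldl_cons]
  have hmemP : ∀ y ∈ (u.foldl (altStep f) ([], 0)).1, y < m := by
    intro y hy
    rcases stack_mem f u ([], 0) y hy with h | h
    · exact hu y h
    · simp at h
  have hhead : (u.foldl (altStep f) ([], 0)).1.headD f = u.getLastD f := by
    rw [stack_last]; rfl
  have hpush : altStep f (u.foldl (altStep f) ([], 0)) m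
      = (m :: (u.foldl (altStep f) ([], 0)).1, (u.foldl (altStep f) ([], 0)).2) := by
    simp only [altStep]
    rw [show (u.foldl (altStep f) ([], 0)) = ((u.foldl (altStep f) ([], 0)).1, (u.foldl (altStep f) ([], 0)).2) from rfl,
      altPop_of_lt f m _ _ hmemP]
  rw [hpush]
  cases w with
  | nil =>
    simp only [List.foldl_nil, List.headD_nil]
    rw [show altDrain f l (m :: (u.foldl (altStep f) ([], 0)).1) (u.foldl (altStep f) ([], 0)).2
        = altDrain f l (u.foldl (altStep f) ([], 0)).1
            ((u.foldl (altStep f) ([], 0)).2 + (u.foldl (altStep f) ([], 0)).1.headD f * m * l) from rfl,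
      altDrain_shift, hhead]
    ring
  | cons w0 w' =>
    have hw0 : w0 ≤ m := hw w0 (by simp)
    simp only [List.foldl_cons]
    have hstep2 : altStep f (m :: (u.foldl (altStep f) ([], 0)).1, (u.foldl (altStep f) ([], 0)).2) w0
        = ((altStep f (u.foldl (altStep f) ([], 0)) w0).1,
           (altStep f (u.foldl (altStep f) ([], 0)) w0).2
             + (u.foldl (altStep f) ([], 0)).1.headD f * m * w0) := by
      simp only [altStep, altPop, if_pos hw0, altPop_shift]
    rw [hstep2, foldl_shift, altDrain_shift, hhead]
    simp only [List.headD_cons]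
    ring

theorem exists_first_max : ∀ (s : List Int), s ≠ [] →
    ∃ u m w, s = u ++ m :: w ∧ (∀ x ∈ u, x < m) ∧ (∀ x ∈ w, x ≤ m) := by
  intro s
  induction s with
  | nil => intro h; exact absurd rfl h
  | cons a t ih =>
    intro _
    cases t with
    | nil => exact ⟨[], a, [], by simp⟩
    | cons b t' =>
      obtain ⟨u, m, w, heq, hu, hw⟩ := ih (by simp)
      by_cases ham : m ≤ a
      · refine ⟨[], a, b :: t', by simp, by simp, ?_⟩
        intro x hx
        rw [heq] at hx
        rcases List.mem_append.mp hx with h | h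
        · exact le_of_lt (lt_of_lt_of_le (hu x h) ham)
        · rcases List.mem_cons.mp h with rfl | h
          · exact ham
          · exact le_trans (hw x h) ham
      · refine ⟨a :: u, m, w, by rw [heq]; rfl, ?_, hw⟩
        intro x hx
        rcases List.mem_cons.mp hx with rfl | h
        · omega
        · exact hu x h

theorem max?_first (m : Int) (u w : List Int)
    (hu : ∀ x ∈ u, x < m) (hw : ∀ x ∈ w, x ≤ m) :
    PySem.List.max? (u ++ m :: w) (fun x => x) = some m := by
  cases hm' : PySem.List.max? (u ++ m :: w) (fun x => x) with
  | none => exact absurd ((PySem.List.max?_eq_none_iff _ _).mp hm') (by simp)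
  | some m' =>
  have hmem := PySem.List.max?_mem hm'
  have hmax := PySem.List.max?_isMax hm'
  have h1 : m ≤ m' := hmax m (by simp)
  have h2 : m' ≤ m := by
    rcases List.mem_append.mp hmem with h | h
    · exact le_of_lt (hu _ h)
    · rcases List.mem_cons.mp h with rfl | h
      · exact le_refl _
      · exact hw _ h
  rw [le_antisymm h2 h1]


theorem index?_first (m : Int) (u w : List Int) (hu : ∀ x ∈ u, x < m) :
    PySem.List.index? (u ++ m :: w) m = some u.length := by
  rw [PySem.List.index?_eq_some_iff]
  exact ⟨u, w, rfl, rfl, fun hm => absurd rfl (ne_of_lt (hu m hm))⟩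

theorem erase_at_len (m : Int) : ∀ (u w : List Int), (u ++ m :: w).eraseIdx u.length = u ++ w := by
  intro u
  induction u with
  | nil => intro w; rfl
  | cons a u' ih => intro w; simp only [List.cons_append, List.eraseIdx_cons_succ, List.length_cons, ih]

theorem get_at_len (m : Int) (u w : List Int) : (u ++ m :: w).getD u.length 0 = m := by
  rw [List.getD_eq_getElem _ _ (by simp), List.getElem_append_right (le_refl _)]
  simp

theorem solLoop_step (f l m : Int) (u w : List Int) (n : Nat)
    (hu : ∀ x ∈ u, x < m) (hw : ∀ x ∈ w, x ≤ m) :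
    solLoop f l (n + 1) (u ++ m :: w) =
      (u.getLastD f) * m * (w.headD l) + solLoop f l n (u ++ w) := by
  have hmax := max?_first m u w hu hw
  have hidx := index?_first m u w hu
  have hpop := PySem.List.pop?_natCast (u ++ m :: w) u.length (by simp)
  rw [erase_at_len] at hpop
  cases u with
  | nil =>
    simp only [List.nil_append, List.getLastD_nil] at hmax hidx hpop ⊢
    simp only [List.length_nil, Nat.cast_zero] at hpop
    simp only [solLoop, hmax, hidx]
    simp only [List.length_nil, Nat.cast_zero, hpop]
    simp only [PySem.List.pyGetD_zero_cons]
    cases w with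
    | nil => simp
    | cons w0 w' =>
      have hcond : ¬ ((0:Nat) = (m :: w0 :: w').length - 1) := by simp
      rw [if_neg hcond]
      have h1 : PySem.List.pyGetD (m :: w0 :: w') ((0:Int) + 1) 0 = w0 := by
        rw [show ((0:Int) + 1) = ((1 : Nat) : Int) by norm_num, PySem.List.pyGetD_natCast]
        rfl
      rw [h1]
      rfl
  | cons a u' =>
    simp only [List.cons_append] at hmax hidx hpop ⊢
    simp only [solLoop, hmax, hidx, hpop]
    have hne : ¬ ((a :: u').length = 0) := by simp
    rw [if_neg hne]
    have hrow : PySem.List.pyGetD (a :: (u' ++ m :: w)) (((a :: u').length : Int) - 1) 0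
        = (a :: u').getLastD f := by
      rw [show (((a :: u').length : Int) - 1) = ((u'.length : Nat) : Int) by simp,
        PySem.List.pyGetD_natCast, List.getD_eq_getElem?_getD,
        List.getLastD_eq_getLast?, List.getLast?_eq_getElem?]
      have h2 : (a :: (u' ++ m :: w))[u'.length]? = (a :: u')[u'.length]? := by
        have := List.getElem?_append_left (l₁ := a :: u') (l₂ := m :: w)
          (i := u'.length) (by simp)
        simpa using this
      rw [h2]
      simp
    have hmid : PySem.List.pyGetD (a :: (u' ++ m :: w)) (((a :: u').length : Nat) : Int) 0 = m := by
      rw [PySem.List.pyGetD_natCast]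
      have := get_at_len m (a :: u') w
      simpa using this
    rw [hrow, hmid]
    cases w with
    | nil =>
      have hcond : (a :: u').length = (a :: (u' ++ [m])).length - 1 := by simp
      rw [if_pos hcond]
      rfl
    | cons w0 w' =>
      have hcond : ¬ ((a :: u').length = (a :: (u' ++ m :: w0 :: w')).length - 1) := by
        simp
      rw [if_neg hcond]
      have h1 : PySem.List.pyGetD (a :: (u' ++ m :: w0 :: w')) (((a :: u').length : Int) + 1) 0 = w0 := by
        rw [show (((a :: u').length : Int) + 1) = (((a :: u').length + 1 : Nat) : Int) by push_cast; ring,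
          PySem.List.pyGetD_natCast, List.getD_eq_getElem _ _ (by simp)]
        have := List.getElem_append_right (as := (a :: u') ++ [m]) (bs := w0 :: w')
          (i := (a :: u').length + 1) (by simp) (h₂ := by simp)
        simp only [List.cons_append, List.append_assoc,
          List.nil_append] at this
        simpa using this
      rw [h1]
      rfl

theorem loop_eq_costB (f l : Int) : ∀ (n : Nat) (s : List Int), s.length ≤ n →
    solLoop f l n s = costB f l s := by
  intro n
  induction n with
  | zero =>
    intro s hs
    have : s = [] := List.length_eq_zero_iff.mp (Nat.le_zero.mp hs)
    subst this
    rfl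
  | succ n ih =>
    intro s hs
    cases hse : s with
    | nil => rfl
    | cons a t =>
      obtain ⟨u, m, w, heq, hu, hw⟩ := exists_first_max (a :: t) (by simp)
      subst hse
      rw [heq, solLoop_step f l m u w n hu hw, costB_step f l m u w hu hw, ih]
      have : (a :: t).length ≤ n + 1 := hs
      rw [heq] at this
      simp at this
      simp
      omega

-- ===== VERDICT (by name: the statement is the Claim_ definition above) =====
theorem solution_spec : Claim_equal_solution := by
  intro ms _ _
  unfold Spec_solution solution solution_alt
  simp only
  rw [loop_eq_costB _ _ _ _ (le_refl _)]
  rfl
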